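-- pv_equiv track=rewrite | github.com/zoujinhang/Calculate_duration | get_txx.py | found_txx
-- ===== SOURCE A (Python) =====
-- def found_txx(t,v,st1,st2):
-- 	t1 = []
-- 	for i in range(len(t)):
-- 		if v[i] >= st1:
-- 			if v[i] >= st2:
-- 				break
-- 			t1.append(t[i])
--
-- 		else:
-- 			t1 = []
-- 	t90 = t1[-1]-t1[0]
-- 	return t90,t1[0],t1[-1]
-- ===== SOURCE B (Python) =====
-- def found_txx(t, v, st1, st2):
--     n = len(t)
--     # forward scan: first index where both thresholds are reached (break point of the run)
--     j = 0
--     while j < n and not (v[j] >= st1 and v[j] >= st2):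
--         j += 1
--     # backward scan: last index before j with v below st1 (start of the final run is k+1)
--     k = j - 1
--     while k >= 0 and v[k] >= st1:
--         k -= 1
--     t1 = t[k + 1:j]
--     return t1[-1] - t1[0], t1[0], t1[-1]
-- ===== Notes on version B (the rewrite author's own statement) =====
-- stated objective: alternative
-- what changed: Instead of accumulating and resetting a run list in one forward pass, B locates the break index by a forward scan, finds the run start by a backward scan, and takes the answer from a single slice of t.
import Mathlib
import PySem

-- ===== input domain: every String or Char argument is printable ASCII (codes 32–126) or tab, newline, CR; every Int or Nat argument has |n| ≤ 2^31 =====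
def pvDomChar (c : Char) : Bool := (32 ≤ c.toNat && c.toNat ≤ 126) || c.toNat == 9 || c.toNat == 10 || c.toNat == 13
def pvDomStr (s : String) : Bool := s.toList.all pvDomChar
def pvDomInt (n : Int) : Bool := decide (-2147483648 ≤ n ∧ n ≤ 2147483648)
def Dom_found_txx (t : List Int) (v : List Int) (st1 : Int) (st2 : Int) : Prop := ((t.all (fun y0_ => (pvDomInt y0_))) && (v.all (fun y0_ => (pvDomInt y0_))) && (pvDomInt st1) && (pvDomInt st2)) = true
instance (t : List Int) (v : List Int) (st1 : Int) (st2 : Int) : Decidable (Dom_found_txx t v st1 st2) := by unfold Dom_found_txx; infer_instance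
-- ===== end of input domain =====

-- B re-implements A by two index scans (forward to the break point, backward to the run start)
-- and one slice, instead of A's accumulate-and-reset list in a single forward pass; same O(n) cost.

-- ===== PORT A =====
-- A's forward loop: i is the loop index, acc is the Python list t1.
-- The `none` branch of pyGet? is where Python raises IndexError (v shorter than t); excluded by Pre_.
def pvLoopA (t v : List Int) (st1 st2 : Int) (i : Nat) (acc : List Int) : List Int :=
  if h : i < t.length then
    match PySem.List.pyGet? v (i : Int) with
    | none => acc
    | some vi =>
      if st1 ≤ vi then
        if st2 ≤ vi then acc
        else pvLoopA t v st1 st2 (i + 1) (acc ++ [t[i]])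
      else pvLoopA t v st1 st2 (i + 1) []
  else acc
termination_by t.length - i

def found_txx (t : List Int) (v : List Int) (st1 : Int) (st2 : Int) : Int × Int × Int :=
  let t1 := pvLoopA t v st1 st2 0 []
  -- t1[-1] and t1[0]: IndexError on empty t1 is excluded by Pre_, so the total default form is exact
  let t90 := PySem.List.pyGetD t1 (-1) 0 - PySem.List.pyGetD t1 0 0
  (t90, PySem.List.pyGetD t1 0 0, PySem.List.pyGetD t1 (-1) 0)

-- ===== PORT B =====
-- forward while-loop: first index j with v[j] >= st1 and v[j] >= st2 (j = len t if none)
def pvJloop (t v : List Int) (st1 st2 : Int) (j : Nat) : Nat :=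
  if h : j < t.length ∧ ¬ (st1 ≤ v.getD j 0 ∧ st2 ≤ v.getD j 0) then
    pvJloop t v st1 st2 (j + 1)
  else j
termination_by t.length - j
decreasing_by omega

-- backward while-loop from index m-1: returns k+1, the start of the run ending just below m
def pvKloop (v : List Int) (st1 : Int) : Nat → Nat
  | 0 => 0
  | m + 1 => if st1 ≤ v.getD m 0 then pvKloop v st1 m else m + 1

def found_txx_alt (t : List Int) (v : List Int) (st1 : Int) (st2 : Int) : Int × Int × Int :=
  let j := pvJloop t v st1 st2 0
  let s := pvKloop v st1 j
  let t1 := PySem.List.slice t (s : Int) (j : Int)   -- t[k+1:j]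
  (PySem.List.pyGetD t1 (-1) 0 - PySem.List.pyGetD t1 0 0,
   PySem.List.pyGetD t1 0 0, PySem.List.pyGetD t1 (-1) 0)

-- ===== PRECONDITION & SPEC =====
-- Pre_ holds exactly when Python A returns normally: there is a loop-exit index j (either the first
-- index where v[i] ≥ st1 and v[i] ≥ st2, read without running past the end of v, or len t with v long
-- enough to finish the loop), and the run ending at j is nonempty (else t1[-1] raises IndexError).
def Pre_found_txx (t : List Int) (v : List Int) (st1 : Int) (st2 : Int) : Prop :=
  ∃ j, j ≤ t.length ∧ j ≤ v.length ∧
    (∀ i, i < j → ¬ (st1 ≤ v.getD i 0 ∧ st2 ≤ v.getD i 0)) ∧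
    (j = t.length ∨ (j < t.length ∧ j < v.length ∧ st1 ≤ v.getD j 0 ∧ st2 ≤ v.getD j 0)) ∧
    0 < j ∧ st1 ≤ v.getD (j - 1) 0
instance (t : List Int) (v : List Int) (st1 : Int) (st2 : Int) : Decidable (Pre_found_txx t v st1 st2) := by
  unfold Pre_found_txx
  infer_instance

def pvWitness_found_txx : List Int × List Int × Int × Int := ([1, 2, 3], [1, 1, 5], 0, 5)

def Spec_found_txx (t : List Int) (v : List Int) (st1 : Int) (st2 : Int) (out : Int × Int × Int) : Prop := out = found_txx_alt t v st1 st2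
instance (t : List Int) (v : List Int) (st1 : Int) (st2 : Int) (out : Int × Int × Int) : Decidable (Spec_found_txx t v st1 st2 out) := by unfold Spec_found_txx; infer_instance

-- ===== CLAIM (what is proved, stated in full; the proofs are below) =====
def Claim_equal_found_txx : Prop := ∀ (t : List Int) (v : List Int) (st1 : Int) (st2 : Int), Dom_found_txx t v st1 st2 → Pre_found_txx t v st1 st2 → Spec_found_txx t v st1 st2 (found_txx t v st1 st2)

-- ===== LEMMAS AND PROOFS =====

lemma pv_getElem?_eq_some_getD (v : List Int) (i : Nat) (h : i < v.length) :
    v[i]? = some (v.getD i 0) := by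
  rw [List.getElem?_eq_getElem h, List.getD_eq_getElem]

-- unfolding equations for A's loop
lemma pvLoopA_end (t v : List Int) (st1 st2 : Int) (i : Nat) (acc : List Int)
    (h : ¬ i < t.length) : pvLoopA t v st1 st2 i acc = acc := by
  rw [pvLoopA, dif_neg h]

lemma pvLoopA_some (t v : List Int) (st1 st2 : Int) (i : Nat) (acc : List Int)
    (hin : i < t.length) (c : Int) (hc : PySem.List.pyGet? v (i : Int) = some c) :
    pvLoopA t v st1 st2 i acc =
      if st1 ≤ c then
        if st2 ≤ c then acc else pvLoopA t v st1 st2 (i + 1) (acc ++ [t[i]])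
      else pvLoopA t v st1 st2 (i + 1) [] := by
  rw [pvLoopA, dif_pos hin, hc]

lemma pvKloop_le (v : List Int) (st1 : Int) (m : Nat) : pvKloop v st1 m ≤ m := by
  induction m with
  | zero => simp [pvKloop]
  | succ m ih => simp only [pvKloop]; split <;> omega

lemma pvKloop_succ_pos (v : List Int) (st1 : Int) (m : Nat) (h : st1 ≤ v.getD m 0) :
    pvKloop v st1 (m + 1) = pvKloop v st1 m := by
  simp only [pvKloop]; rw [if_pos h]

lemma pvKloop_succ_neg (v : List Int) (st1 : Int) (m : Nat) (h : ¬ st1 ≤ v.getD m 0) :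
    pvKloop v st1 (m + 1) = m + 1 := by
  simp only [pvKloop]; rw [if_neg h]

-- B's forward loop lands exactly on the j described by Pre_
lemma pvJloop_eq (t v : List Int) (st1 st2 : Int) (j : Nat)
    (hjn : j ≤ t.length)
    (hlt : ∀ i, i < j → ¬ (st1 ≤ v.getD i 0 ∧ st2 ≤ v.getD i 0))
    (hend : j = t.length ∨ (j < t.length ∧ st1 ≤ v.getD j 0 ∧ st2 ≤ v.getD j 0)) :
    ∀ i, i ≤ j → pvJloop t v st1 st2 i = j := by
  intro i hi
  induction hd : j - i generalizing i with
  | zero =>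
    have hij : i = j := by omega
    subst hij
    rw [pvJloop]
    rcases hend with h | h
    · exact dif_neg (fun hc => absurd hc.1 (by omega))
    · exact dif_neg (fun hc => hc.2 ⟨h.2.1, h.2.2⟩)
  | succ d ih =>
    have hij : i < j := by omega
    rw [pvJloop, dif_pos ⟨by omega, hlt i hij⟩]
    exact ih (i + 1) (by omega) (by omega)

-- the key invariant: A's accumulator at index i is the slice t[pvKloop i : i],
-- and from any i ≤ j the loop ends with the slice t[pvKloop j : j]
lemma pvLoopA_inv (t v : List Int) (st1 st2 : Int) (j : Nat)
    (hjn : j ≤ t.length) (hjv : j ≤ v.length)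
    (hlt : ∀ i, i < j → ¬ (st1 ≤ v.getD i 0 ∧ st2 ≤ v.getD i 0))
    (hend : j = t.length ∨ (j < t.length ∧ j < v.length ∧ st1 ≤ v.getD j 0 ∧ st2 ≤ v.getD j 0)) :
    ∀ i, i ≤ j →
      pvLoopA t v st1 st2 i ((t.drop (pvKloop v st1 i)).take (i - pvKloop v st1 i))
        = (t.drop (pvKloop v st1 j)).take (j - pvKloop v st1 j) := by
  intro i hi
  induction hd : j - i generalizing i with
  | zero =>
    have hij : i = j := by omega
    subst hij
    rcases hend with h | h
    · exact pvLoopA_end t v st1 st2 i _ (by omega)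
    · rw [pvLoopA_some t v st1 st2 i _ h.1 (v.getD i 0)
        (by rw [PySem.List.pyGet?_natCast]; exact pv_getElem?_eq_some_getD v i h.2.1)]
      rw [if_pos h.2.2.1, if_pos h.2.2.2]
  | succ d ih =>
    have hij : i < j := by omega
    have hiv : i < v.length := by omega
    have hin : i < t.length := by omega
    rw [pvLoopA_some t v st1 st2 i _ hin (v.getD i 0)
      (by rw [PySem.List.pyGet?_natCast]; exact pv_getElem?_eq_some_getD v i hiv)]
    by_cases h1 : st1 ≤ v.getD i 0
    · have h2 : ¬ st2 ≤ v.getD i 0 := fun h2 => hlt i hij ⟨h1, h2⟩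
      rw [if_pos h1, if_neg h2]
      have hk := pvKloop_succ_pos v st1 i h1
      have hkle : pvKloop v st1 i ≤ i := pvKloop_le v st1 i
      have hseg : (t.drop (pvKloop v st1 i)).take (i - pvKloop v st1 i) ++ [t[i]]
          = (t.drop (pvKloop v st1 (i + 1))).take (i + 1 - pvKloop v st1 (i + 1)) := by
        rw [hk]
        have he : i + 1 - pvKloop v st1 i = (i - pvKloop v st1 i) + 1 := by omega
        rw [he, List.take_add_one, List.getElem?_drop]
        have hidx : pvKloop v st1 i + (i - pvKloop v st1 i) = i := by omega
        rw [hidx, List.getElem?_eq_getElem hin]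
        rfl
      rw [hseg]
      exact ih (i + 1) (by omega) (by omega)
    · rw [if_neg h1]
      have hk := pvKloop_succ_neg v st1 i h1
      have : ([] : List Int) = (t.drop (pvKloop v st1 (i + 1))).take (i + 1 - pvKloop v st1 (i + 1)) := by
        rw [hk]; simp
      rw [this]
      exact ih (i + 1) (by omega) (by omega)

-- ===== VERDICT (by name: the statement is the Claim_ definition above) =====
theorem found_txx_spec : Claim_equal_found_txx := by
  intro t v st1 st2 _hdom hpre
  obtain ⟨j, hjn, hjv, hlt, hend, _hpos, _hrun⟩ := hpre
  have hend' : j = t.length ∨ (j < t.length ∧ st1 ≤ v.getD j 0 ∧ st2 ≤ v.getD j 0) := by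
    rcases hend with h | h
    · exact Or.inl h
    · exact Or.inr ⟨h.1, h.2.2.1, h.2.2.2⟩
  have hJ : pvJloop t v st1 st2 0 = j := pvJloop_eq t v st1 st2 j hjn hlt hend' 0 (by omega)
  have hA : pvLoopA t v st1 st2 0 []
      = (t.drop (pvKloop v st1 j)).take (j - pvKloop v st1 j) := by
    have := pvLoopA_inv t v st1 st2 j hjn hjv hlt hend 0 (by omega)
    simpa [pvKloop] using this
  show found_txx t v st1 st2 = found_txx_alt t v st1 st2
  simp only [found_txx, found_txx_alt]
  rw [hJ, PySem.List.slice_natCast, hA]
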